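-- pv_equiv track=rewrite | github.com/sun-hainan/Python | 编码理论/lz77_lz78.py | lz78_decompress
-- ===== SOURCE A (Python) =====
-- from typing import List, Tuple, Optional
--
-- def lz78_decompress(compressed: List[Tuple[int, str]]) -> str:
--     """
--     LZ78解压
--
--     Args:
--         compressed: 压缩后的对列表
--
--     Returns:
--         解压后的文本
--     """
--     dictionary = {0: ''}
--     next_index = 1
--     result = []
--
--     for index, char in compressed:
--         phrase = dictionary[index] + char
--         result.append(phrase)
--         dictionary[next_index] = phrase
--         next_index += 1
--
--     return ''.join(result)
-- ===== SOURCE B (Python) =====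
-- def lz78_decompress(compressed):
--     """LZ78 decompression keeping the dictionary as back-pointers
--     (parent index, token) instead of materialized phrase strings; each
--     phrase is reconstructed by walking parent links back to the root."""
--     parent = {0: (0, '')}  # entry 0: the empty root phrase
--     next_index = 1
--     out = []
--     for index, token in compressed:
--         chars = []
--         i = index
--         while i != 0:  # walk back-pointers up to the root
--             p, t = parent[i]
--             chars.append(t)
--             i = p
--         chars.reverse()
--         chars.append(token)
--         out.extend(chars)
--         parent[next_index] = (index, token)
--         next_index += 1
--     return ''.join(out)
-- ===== Notes on version B (the rewrite author's own statement) =====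
-- stated objective: alternative
-- what changed: The dictionary of materialized phrase strings is replaced by a dictionary of back-pointers (parent index, token); each phrase is reconstructed by an inner walk along parent links to the root, reversed, instead of being stored and concatenated.
import Mathlib
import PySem

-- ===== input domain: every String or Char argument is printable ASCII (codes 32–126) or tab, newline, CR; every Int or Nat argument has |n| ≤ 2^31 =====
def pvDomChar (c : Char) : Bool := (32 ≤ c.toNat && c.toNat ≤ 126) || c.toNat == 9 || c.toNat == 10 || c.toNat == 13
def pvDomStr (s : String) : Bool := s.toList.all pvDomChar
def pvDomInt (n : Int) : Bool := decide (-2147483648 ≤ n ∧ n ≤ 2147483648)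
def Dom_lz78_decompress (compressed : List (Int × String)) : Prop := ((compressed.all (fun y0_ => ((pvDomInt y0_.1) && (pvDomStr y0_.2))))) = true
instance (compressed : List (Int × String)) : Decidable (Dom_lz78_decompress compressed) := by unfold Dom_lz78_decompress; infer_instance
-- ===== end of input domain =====

-- B replaces A's dictionary of materialized phrase strings by a dictionary of back-pointers
-- (parent index, token), reconstructing each phrase by walking parent links to the root.


-- ===== PORT A =====
-- loop of A: dict of phrases, next index, accumulated result; none = KeyError
def lz78_loopA : List (Int × String) → PySem.Dict Int String → Int → List String → Option (List String)
  | [], _dict, _next, result => some result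
  | (index, ch) :: rest, dict, next, result =>
    match dict.get? index with
    | none => none        -- dictionary[index] raises KeyError; excluded by Pre_
    | some base => lz78_loopA rest (dict.insert next (base ++ ch)) (next + 1) (result ++ [base ++ ch])

def lz78_decompress (compressed : List (Int × String)) : String :=
  match lz78_loopA compressed (PySem.Dict.ofList [((0 : Int), "")]) 1 [] with
  | some result => PySem.Str.join "" result
  | none => ""            -- unreachable under Pre_

-- ===== PORT B =====
-- while i != 0: chars.append(parent[i][1]); i = parent[i][0].  fuel = next_index is a
-- totality guard only: under Pre_ back-pointers strictly decrease, so it is never exhausted.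
def lz78_chase (parent : PySem.Dict Int (Int × String)) : Int → Nat → List String
  | _, 0 => []
  | i, fuel + 1 =>
    if i ≠ 0 then
      match parent.get? i with
      | some pt => pt.2 :: lz78_chase parent pt.1 fuel
      | none => []        -- parent[i] raises KeyError; excluded by Pre_
    else []

def lz78_loopB : List (Int × String) → PySem.Dict Int (Int × String) → Int → List String → List String
  | [], _parent, _next, out => out
  | (index, token) :: rest, parent, next, out =>
    let chars := lz78_chase parent index next.toNat
    lz78_loopB rest (parent.insert next (index, token)) (next + 1) (out ++ chars.reverse ++ [token])

def lz78_decompress_alt (compressed : List (Int × String)) : String :=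
  PySem.Str.join "" (lz78_loopB compressed (PySem.Dict.ofList [((0 : Int), ((0 : Int), ""))]) 1 [])

-- ===== PRECONDITION & SPEC =====
-- Pre_ excludes exactly the inputs where both Pythons raise KeyError: some pair's index is
-- outside the dictionary keys 0..position available when it is read.
def Pre_lz78_decompress (compressed : List (Int × String)) : Prop :=
  ∀ p ∈ PySem.List.enumerate compressed 0, 0 ≤ p.2.1 ∧ p.2.1 ≤ p.1
instance (compressed : List (Int × String)) : Decidable (Pre_lz78_decompress compressed) := by
  unfold Pre_lz78_decompress; infer_instance

def pvWitness_lz78_decompress : (List (Int × String)) := [(0, "a"), (1, "b"), (0, "c")]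

def Spec_lz78_decompress (compressed : List (Int × String)) (out : String) : Prop :=
  out = lz78_decompress_alt compressed
instance (compressed : List (Int × String)) (out : String) : Decidable (Spec_lz78_decompress compressed out) := by
  unfold Spec_lz78_decompress; infer_instance

-- ===== CLAIM (what is proved, stated in full; the proofs are below) =====
def Claim_equal_lz78_decompress : Prop := ∀ (compressed : List (Int × String)), Dom_lz78_decompress compressed → Pre_lz78_decompress compressed → Spec_lz78_decompress compressed (lz78_decompress compressed)

-- ===== LEMMAS AND PROOFS =====

-- concatenation of the character lists of a list of strings
def lzFlat (l : List String) : List Char := (l.map String.toList).flatten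

lemma lzFlat_append (a b : List String) : lzFlat (a ++ b) = lzFlat a ++ lzFlat b := by
  simp [lzFlat]

lemma join_empty_eq_flat (l : List String) :
    PySem.Str.join "" l = String.ofList (lzFlat l) := by
  have h : ∀ ll : List (List Char), PySem.Chars.join [] ll = ll.flatten := by
    intro ll
    simp only [PySem.Chars.join, List.intercalate]
    induction ll with
    | nil => simp
    | cons a t ih => cases t <;> simp_all [List.intersperse]
  simp [PySem.Str.join, lzFlat, h]

-- back-pointers of parent are well-formed below L: every stored parent index is smaller
def lzWF (parent : PySem.Dict Int (Int × String)) (L : Nat) : Prop :=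
  ∀ n : Nat, 1 ≤ n → n < L →
    ∃ pt, parent.get? (n : Int) = some pt ∧ 0 ≤ pt.1 ∧ pt.1 < (n : Int)

-- the phrase denoted by entry n of parent (root-to-leaf character list), fuel L
def lzPhrase (parent : PySem.Dict Int (Int × String)) (L n : Nat) : List Char :=
  lzFlat ((lz78_chase parent (n : Int) L).reverse)

lemma chase_insert (parent : PySem.Dict Int (Int × String)) (L : Nat) (hwf : lzWF parent L)
    (e : Int × String) :
    ∀ (f : Nat) (i : Int), 0 ≤ i → i < (L : Int) →
      lz78_chase (parent.insert (L : Int) e) i f = lz78_chase parent i f := by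
  intro f
  induction f with
  | zero => intro i _ _; rfl
  | succ f ih =>
    intro i h0 hlt
    by_cases hz : i = 0
    · subst hz; simp [lz78_chase]
    · have hn1 : 1 ≤ i.toNat := by omega
      have hnL : i.toNat < L := by omega
      have hi : ((i.toNat : Nat) : Int) = i := Int.toNat_of_nonneg h0
      obtain ⟨pt, hpt, hp0, hplt⟩ := hwf i.toNat hn1 hnL
      rw [hi] at hpt hplt
      have hne : i ≠ (L : Int) := by omega
      simp only [lz78_chase, if_pos hz,
        PySem.Dict.get?_insert_of_ne parent e hne, hpt]
      rw [ih pt.1 hp0 (by omega)]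

lemma chase_fuel_aux (parent : PySem.Dict Int (Int × String)) (L : Nat) (hwf : lzWF parent L) :
    ∀ (k : Nat) (i : Int) (f₁ f₂ : Nat), i.toNat ≤ k → 0 ≤ i → i < (L : Int) →
      i.toNat ≤ f₁ → i.toNat ≤ f₂ →
      lz78_chase parent i f₁ = lz78_chase parent i f₂ := by
  intro k
  induction k with
  | zero =>
    intro i f₁ f₂ hk h0 _ _ _
    have : i = 0 := by omega
    subst this
    cases f₁ <;> cases f₂ <;> simp [lz78_chase]
  | succ k ih =>
    intro i f₁ f₂ hk h0 hlt hf₁ hf₂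
    by_cases hz : i = 0
    · subst hz; cases f₁ <;> cases f₂ <;> simp [lz78_chase]
    · obtain ⟨a, rfl⟩ : ∃ a, f₁ = a + 1 := ⟨f₁ - 1, by omega⟩
      obtain ⟨b, rfl⟩ : ∃ b, f₂ = b + 1 := ⟨f₂ - 1, by omega⟩
      have hn1 : 1 ≤ i.toNat := by omega
      have hnL : i.toNat < L := by omega
      have hi : ((i.toNat : Nat) : Int) = i := Int.toNat_of_nonneg h0
      obtain ⟨pt, hpt, hp0, hplt⟩ := hwf i.toNat hn1 hnL
      rw [hi] at hpt hplt
      simp only [lz78_chase, if_pos hz, hpt]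
      rw [ih pt.1 a b (by omega) hp0 (by omega) (by omega) (by omega)]

-- main loop invariant: A's phrase dictionary is the phrase semantics of B's back-pointer dictionary
lemma loop_eq : ∀ (rest : List (Int × String)) (dict : PySem.Dict Int String)
    (parent : PySem.Dict Int (Int × String)) (L : Nat) (out resA : List String),
    lzWF parent L → 1 ≤ L →
    (∀ n : Nat, n < L →
      ∃ s, dict.get? (n : Int) = some s ∧ s.toList = lzPhrase parent L n) →
    (∀ p ∈ PySem.List.enumerate rest ((L : Int) - 1), 0 ≤ p.2.1 ∧ p.2.1 ≤ p.1) →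
    lzFlat resA = lzFlat out →
    ∃ res', lz78_loopA rest dict (L : Int) resA = some res' ∧
      lzFlat res' = lzFlat (lz78_loopB rest parent (L : Int) out) := by
  intro rest
  induction rest with
  | nil =>
    intro dict parent L out resA _ _ _ _ hflat
    exact ⟨resA, rfl, by simpa [lz78_loopB] using hflat⟩
  | cons head tail ih =>
    obtain ⟨idx, tok⟩ := head
    intro dict parent L out resA hwf hlen hdict hpre hflat
    have hhead := hpre ((L : Int) - 1, idx, tok)
      (by rw [PySem.List.enumerate_cons]; simp)
    have h0 : 0 ≤ idx := by simpa using hhead.1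
    have hle : idx ≤ (L : Int) - 1 := by simpa using hhead.2
    have hn : idx.toNat < L := by omega
    have hi : ((idx.toNat : Nat) : Int) = idx := Int.toNat_of_nonneg h0
    have hilt : idx < (L : Int) := by omega
    obtain ⟨base, hget, hbase⟩ := hdict idx.toNat hn
    rw [hi] at hget
    have hwf' : lzWF (parent.insert (L : Int) (idx, tok)) (L + 1) := by
      intro n hn1 hnL
      rcases Nat.lt_or_ge n L with hsm | hsm
      · obtain ⟨pt, hpt, hb⟩ := hwf n hn1 hsm
        exact ⟨pt, by
          rw [PySem.Dict.get?_insert_of_ne parent (idx, tok) (by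
            intro hc
            have h2 : (n : Int) = (L : Int) := hc
            omega)]
          exact hpt, hb⟩
      · have hEq : n = L := by omega
        subst hEq
        exact ⟨(idx, tok), by rw [PySem.Dict.get?_insert_self], h0, by omega⟩
    have hchase_new : lz78_chase (parent.insert (L : Int) (idx, tok)) (L : Int) (L + 1) =
        tok :: lz78_chase parent idx L := by
      have hstep : lz78_chase (parent.insert (L : Int) (idx, tok)) (L : Int) (L + 1) =
          tok :: lz78_chase (parent.insert (L : Int) (idx, tok)) idx L := by
        simp only [lz78_chase, PySem.Dict.get?_insert_self]
        rw [if_pos (by omega)]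
      rw [hstep, chase_insert parent L hwf (idx, tok) L idx h0 hilt]
    have hbase' : lzFlat ((lz78_chase parent idx L).reverse) = base.toList := by
      rw [hbase]; unfold lzPhrase; rw [hi]
    have hdict' : ∀ n' : Nat, n' < L + 1 →
        ∃ s, (dict.insert (L : Int) (base ++ tok)).get? (n' : Int) = some s ∧
          s.toList = lzPhrase (parent.insert (L : Int) (idx, tok)) (L + 1) n' := by
      intro n' hn'
      rcases Nat.lt_or_ge n' L with hsm | hsm
      · obtain ⟨s, hs, hsl⟩ := hdict n' hsm
        refine ⟨s, ?_, ?_⟩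
        · rw [PySem.Dict.get?_insert_of_ne dict (base ++ tok) (by
            intro hc
            have h2 : (n' : Int) = (L : Int) := hc
            omega)]
          exact hs
        · rw [hsl]
          unfold lzPhrase
          rw [chase_insert parent L hwf (idx, tok) (L + 1) (n' : Int)
            (Int.natCast_nonneg n') (by exact_mod_cast hsm)]
          rw [chase_fuel_aux parent L hwf n' (n' : Int) (L + 1) L
            (by simp) (Int.natCast_nonneg n') (by exact_mod_cast hsm) (by simp; omega) (by simp; omega)]
      · have hEq : n' = L := by omega
        subst hEq
        refine ⟨base ++ tok, by rw [PySem.Dict.get?_insert_self], ?_⟩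
        unfold lzPhrase
        rw [hchase_new]
        simp only [List.reverse_cons]
        rw [lzFlat_append, hbase']
        simp [lzFlat]
    have hpre' : ∀ p ∈ PySem.List.enumerate tail (((L + 1 : Nat) : Int) - 1),
        0 ≤ p.2.1 ∧ p.2.1 ≤ p.1 := by
      intro p hp
      apply hpre
      rw [PySem.List.enumerate_cons]
      refine List.mem_cons_of_mem _ ?_
      have he : (((L + 1 : Nat) : Nat) : Int) - 1 = (L : Int) - 1 + 1 := by push_cast; ring
      rw [he] at hp
      exact hp
    have hflat' : lzFlat (resA ++ [base ++ tok]) =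
        lzFlat (out ++ (lz78_chase parent idx L).reverse ++ [tok]) := by
      rw [lzFlat_append, lzFlat_append, lzFlat_append, hflat, hbase']
      simp [lzFlat]
    obtain ⟨res', h1, h2⟩ := ih (dict.insert (L : Int) (base ++ tok))
      (parent.insert (L : Int) (idx, tok)) (L + 1)
      (out ++ (lz78_chase parent idx L).reverse ++ [tok]) (resA ++ [base ++ tok])
      hwf' (by omega) hdict' hpre' hflat'
    refine ⟨res', ?_, ?_⟩
    · simp only [lz78_loopA, hget]
      push_cast at h1 ⊢
      exact h1
    · rw [h2]
      simp only [lz78_loopB]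
      have ht : ((L : Int)).toNat = L := by omega
      rw [ht]
      push_cast
      rfl

-- ===== VERDICT (by name: the statement is the Claim_ definition above) =====
theorem lz78_decompress_spec : Claim_equal_lz78_decompress := by
  intro compressed _hdom hpre
  unfold Spec_lz78_decompress lz78_decompress lz78_decompress_alt
  have hwf : lzWF (PySem.Dict.ofList [((0 : Int), ((0 : Int), ""))]) 1 := by
    intro n hn1 hnL; omega
  have hdict : ∀ n : Nat, n < 1 →
      ∃ s, (PySem.Dict.ofList [((0 : Int), "")]).get? (n : Int) = some s ∧
        s.toList = lzPhrase (PySem.Dict.ofList [((0 : Int), ((0 : Int), ""))]) 1 n := by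
    intro n hn
    have : n = 0 := by omega
    subst this
    exact ⟨"", by decide, by decide⟩
  have := loop_eq compressed (PySem.Dict.ofList [((0 : Int), "")])
    (PySem.Dict.ofList [((0 : Int), ((0 : Int), ""))]) 1 [] []
    hwf (by omega) hdict (by
      intro p hp
      norm_num at hp
      exact hpre p (by simpa using hp)) rfl
  obtain ⟨res', h1, h2⟩ := this
  norm_num at h1
  rw [h1]
  simp only [join_empty_eq_flat, h2]
  norm_num
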